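-- pv_equiv track=rewrite | github.com/eliottcassidy2000/math | 04-computation/skeleton_n7_eigenvalues.py | tiling_to_upper
-- ===== SOURCE A (Python) =====
-- def tiling_to_upper(n, tiling_bits):
--     """Convert tiling encoding to upper-triangle encoding.
--
--     Tiling encoding: edge (i, i+1) always i->i+1 (not in bits).
--     Other edges: for i in range(n), for j in range(i+2, n).
--
--     Upper-triangle encoding: all (i,j) with i<j, in order.
--     """
--     # Build the tiling edge list
--     tiling_edges = []
--     for i in range(n):
--         for j in range(i+2, n):
--             tiling_edges.append((i, j))
--
--     # Build upper-triangle pairs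
--     upper_pairs = []
--     for i in range(n):
--         for j in range(i+1, n):
--             upper_pairs.append((i, j))
--     upper_idx = {p: k for k, p in enumerate(upper_pairs)}
--
--     # Start with all spine edges i->i+1
--     ubits = 0
--     for i in range(n-1):
--         ubits |= (1 << upper_idx[(i, i+1)])
--
--     # Add tiling bits
--     for tidx, (i, j) in enumerate(tiling_edges):
--         if (tiling_bits >> tidx) & 1:
--             ubits |= (1 << upper_idx[(i, j)])
--         # else: j->i, which means A[i][j]=0, already 0
--
--     return ubits
-- ===== SOURCE B (Python) =====
-- def tiling_to_upper(n, tiling_bits):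
--     """Single interleaved pass over upper-triangle pairs with running
--     output-bit counter k and tiling-bit counter tidx; no edge lists, no index dict built."""
--     ubits = 0
--     k = 0
--     tidx = 0
--     for i in range(n):
--         for j in range(i + 1, n):
--             if j == i + 1:
--                 bit = 1
--             else:
--                 bit = (tiling_bits >> tidx) & 1
--                 tidx += 1
--             if bit:
--                 ubits |= 1 << k
--             k += 1
--     return ubits
-- ===== Notes on version B (the rewrite author's own statement) =====
-- stated objective: faster
-- what changed: Replaced A's prebuilt edge lists, enumerate-built index dict and two separate OR passes with one table-free pass over the upper-triangle pairs that maintains running output-bit and tiling-bit counters.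
import Mathlib
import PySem

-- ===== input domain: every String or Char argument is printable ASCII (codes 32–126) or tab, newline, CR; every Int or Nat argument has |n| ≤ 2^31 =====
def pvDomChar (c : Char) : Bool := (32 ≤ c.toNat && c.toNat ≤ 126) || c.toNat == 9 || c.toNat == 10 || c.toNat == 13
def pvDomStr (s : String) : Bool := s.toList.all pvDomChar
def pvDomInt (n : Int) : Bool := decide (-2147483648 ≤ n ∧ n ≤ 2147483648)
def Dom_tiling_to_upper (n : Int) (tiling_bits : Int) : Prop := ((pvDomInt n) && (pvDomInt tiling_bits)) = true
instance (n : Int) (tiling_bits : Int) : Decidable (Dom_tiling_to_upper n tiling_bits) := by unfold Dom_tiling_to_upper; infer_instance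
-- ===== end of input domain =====

-- B replaces A's prebuilt edge lists, index dict and two OR passes by one table-free
-- interleaved pass over the upper-triangle pairs with running counters (objective: faster,
-- a constant-factor win measured; same O(n^2) pair count).

-- ===== PORT A =====
-- dict indices and enumerate indices are nonnegative, so `.toNat` on a shift amount is exact;
-- the `getD … 0` default is never consulted (every key looked up was inserted).
def tiling_to_upper (n : Int) (tiling_bits : Int) : Int :=
  let tiling_edges : List (Int × Int) :=
    (PySem.List.pyRange 0 n 1).foldl (fun acc i =>
      (PySem.List.pyRange (i+2) n 1).foldl (fun acc j => acc ++ [(i, j)]) acc) []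
  let upper_pairs : List (Int × Int) :=
    (PySem.List.pyRange 0 n 1).foldl (fun acc i =>
      (PySem.List.pyRange (i+1) n 1).foldl (fun acc j => acc ++ [(i, j)]) acc) []
  -- 'enumerate(...)' in a comprehension/loop is ported as the same fold carrying the running
  -- index (PySem.List.enumerate's recursion overflows the evaluator's stack on long lists);
  -- the proofs bridge it to PySem.List.enumerate
  let upper_idx : PySem.Dict (Int × Int) Int :=
    (upper_pairs.foldl (fun (p : PySem.Dict (Int × Int) Int × Int) pr =>
      (p.1.insert pr p.2, p.2 + 1)) (PySem.Dict.empty, 0)).1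
  let ubits : Int :=
    (PySem.List.pyRange 0 (n-1) 1).foldl (fun u i =>
      PySem.Int.bor u ((1 : Int) <<< (upper_idx.getD (i, i+1) 0).toNat)) 0
  (tiling_edges.foldl (fun (p : Int × Int) (pr : Int × Int) =>
    (if PySem.Int.band (tiling_bits >>> p.2.toNat) 1 ≠ 0 then
      PySem.Int.bor p.1 ((1 : Int) <<< (upper_idx.getD pr 0).toNat)
    else p.1, p.2 + 1)) (ubits, 0)).1

-- ===== PORT B =====
-- state is (ubits, k, tidx); the counters k and tidx stay nonnegative, kept as Nat for the shifts
def tiling_to_upper_alt (n : Int) (tiling_bits : Int) : Int :=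
  ((PySem.List.pyRange 0 n 1).foldl (fun (st : Int × Nat × Nat) i =>
    (PySem.List.pyRange (i+1) n 1).foldl (fun st j =>
      let bit : Int := if j = i + 1 then 1 else PySem.Int.band (tiling_bits >>> st.2.2) 1
      let tidx : Nat := if j = i + 1 then st.2.2 else st.2.2 + 1
      let ubits : Int := if bit ≠ 0 then PySem.Int.bor st.1 ((1 : Int) <<< st.2.1) else st.1
      (ubits, st.2.1 + 1, tidx)) st) ((0 : Int), (0 : Nat), (0 : Nat))).1

-- ===== PRECONDITION & SPEC =====
def Spec_tiling_to_upper (n : Int) (tiling_bits : Int) (out : Int) : Prop := out = tiling_to_upper_alt n tiling_bits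
instance (n : Int) (tiling_bits : Int) (out : Int) : Decidable (Spec_tiling_to_upper n tiling_bits out) := by unfold Spec_tiling_to_upper; infer_instance

-- ===== CLAIM (what is proved, stated in full; the proofs are below) =====
def Claim_equal_tiling_to_upper : Prop := ∀ (n : Int) (tiling_bits : Int), Dom_tiling_to_upper n tiling_bits → Spec_tiling_to_upper n tiling_bits (tiling_to_upper n tiling_bits)

-- ===== LEMMAS AND PROOFS =====

-- Nat-level canonical forms shared by both proofs.
-- Kf m i = number of upper-triangle pairs in rows < i;  Tf m i = number of tiling edges in rows < i.
def Kf (m i : Nat) : Nat := ((List.range i).map (fun t => m - 1 - t)).sum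
def Tf (m i : Nat) : Nat := ((List.range i).map (fun t => m - 2 - t)).sum

-- OR of the selected tiling bits of one row, output bits starting at k, tiling bits at t.
def rowOr (tb : Int) (k t w : Nat) : Nat :=
  (List.range w).foldl (fun u c => if PySem.Int.band (tb >>> (t + c)) 1 ≠ 0 then u ||| 2 ^ (k + c) else u) 0

def rowAll (m : Nat) (tb : Int) (i : Nat) : Nat :=
  if i + 1 < m then 2 ^ Kf m i ||| rowOr tb (Kf m i + 1) (Tf m i) (m - 2 - i) else 0

def DD (m : Nat) (tb : Int) (p : Nat) : Nat := (List.range p).foldl (fun u i => u ||| rowAll m tb i) 0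

def SSf (m p : Nat) : Nat := (List.range p).foldl (fun u i => u ||| 2 ^ Kf m i) 0

def TT (m : Nat) (tb : Int) (p : Nat) : Nat :=
  (List.range p).foldl (fun u i => u ||| rowOr tb (Kf m i + 1) (Tf m i) (m - 2 - i)) 0

-- upper-triangle pair rows and tiling-edge rows
def uRow (m i : Nat) : List (Int × Int) := (List.range (m - 1 - i)).map (fun (c : Nat) => ((i : Int), (i : Int) + 1 + (c : Int)))
def tRow (m i : Nat) : List (Int × Int) := (List.range (m - 2 - i)).map (fun (c : Nat) => ((i : Int), (i : Int) + 2 + (c : Int)))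
def UP (m p : Nat) : List (Int × Int) := (List.range p).flatMap (uRow m)
def TE (m p : Nat) : List (Int × Int) := (List.range p).flatMap (tRow m)

theorem Kf_succ (m i : Nat) : Kf m (i + 1) = Kf m i + (m - 1 - i) := by
  simp [Kf, List.range_succ]
theorem Tf_succ (m i : Nat) : Tf m (i + 1) = Tf m i + (m - 2 - i) := by
  simp [Tf, List.range_succ]

theorem length_UP (m p : Nat) : (UP m p).length = Kf m p := by
  induction p with
  | zero => simp [UP, Kf]
  | succ q ih => simp [UP, List.range_succ, Kf_succ, ← ih, uRow]

theorem length_TE (m p : Nat) : (TE m p).length = Tf m p := by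
  induction p with
  | zero => simp [TE, Tf]
  | succ q ih => simp [TE, List.range_succ, Tf_succ, ← ih, tRow]

-- generic OR-fold algebra over Nat
theorem or_foldl_init {α : Type} (l : List α) (f : α → Nat) (a : Nat) :
    l.foldl (fun u x => u ||| f x) a = a ||| l.foldl (fun u x => u ||| f x) 0 := by
  induction l generalizing a with
  | nil => simp
  | cons x xs ih =>
    simp only [List.foldl_cons]
    rw [ih (a ||| f x), ih (0 ||| f x)]
    simp [Nat.or_assoc]

theorem or_fold_merge {α : Type} (l : List α) (f g : α → Nat) :
    l.foldl (fun u x => u ||| (f x ||| g x)) 0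
      = l.foldl (fun u x => u ||| f x) 0 ||| l.foldl (fun u x => u ||| g x) 0 := by
  induction l with
  | nil => simp
  | cons x xs ih =>
    simp only [List.foldl_cons, Nat.zero_or]
    rw [or_foldl_init xs _ (f x ||| g x), or_foldl_init xs _ (f x), or_foldl_init xs _ (g x), ih]
    simp [Nat.or_assoc, Nat.or_left_comm]

theorem cast_bor_shift (a k : Nat) :
    PySem.Int.bor (a : Int) ((1 : Int) <<< k) = ((a ||| 2 ^ k : Nat) : Int) := by
  have h1 : ((1 : Int) <<< k) = (((2 ^ k : Nat) : Int)) := by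
    rw [Int.shiftLeft_eq]; push_cast; ring
  rw [h1, PySem.Int.bor_natCast]

theorem rowOr_succ (tb : Int) (k t w : Nat) :
    rowOr tb k t (w + 1)
      = if PySem.Int.band (tb >>> (t + w)) 1 ≠ 0 then rowOr tb k t w ||| 2 ^ (k + w)
        else rowOr tb k t w := by
  simp [rowOr, List.range_succ]

theorem nodup_UP (m : Nat) : (UP m m).Nodup := by
  rw [UP, List.nodup_flatMap]
  constructor
  · intro i _
    simp only [uRow]
    refine List.Nodup.map ?_ List.nodup_range
    intro c c' h
    have h2 := congrArg Prod.snd h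
    simp only at h2
    omega
  · refine List.pairwise_lt_range.imp ?_
    intro i j hij
    intro p hp hq
    simp only [uRow, List.mem_map] at hp hq
    obtain ⟨c, _, rfl⟩ := hp
    obtain ⟨c', _, h⟩ := hq
    have h1 := congrArg Prod.fst h
    simp only at h1
    omega

-- membership of each pair, with its index, in the enumeration of the full pair list
theorem mem_enum_UP (m i c : Nat) (hi : i < m) (hc : c < m - 1 - i) :
    (((Kf m i + c : Nat) : Int), ((i : Int), (i : Int) + 1 + c)) ∈ PySem.List.enumerate (UP m m) 0 := by
  have hsplit : List.range m = List.range i ++ [i] ++ (List.range (m - 1 - i)).map (fun t => (i + 1) + t) := by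
    have h1 : m = (i + 1) + (m - 1 - i) := by omega
    rw [show List.range i ++ [i] = List.range (i + 1) by rw [List.range_succ]]
    conv_lhs => rw [h1, List.range_add]
  have hUP : UP m m = UP m i ++ (uRow m i ++ ((List.range (m - 1 - i)).map (fun t => (i + 1) + t)).flatMap (uRow m)) := by
    rw [UP, hsplit, List.flatMap_append, List.flatMap_append, UP]
    simp
  rw [hUP, PySem.List.enumerate_append, List.mem_append]
  right
  rw [PySem.List.enumerate_append, List.mem_append]
  left
  rw [PySem.List.mem_enumerate_iff]
  refine ⟨c, by simp [uRow, hc], ?_⟩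
  have : (uRow m i)[c]'(by simp [uRow, hc]) = ((i : Int), (i : Int) + 1 + c) := by
    simp only [uRow, List.getElem_map, List.getElem_range]
  rw [this, length_UP]
  have h2 : ((Kf m i + c : Nat) : Int) = 0 + (Kf m i : Int) + (c : Int) := by push_cast; ring
  rw [h2]

-- the dict built by A, characterised
theorem upper_idx_getD (m i c : Nat) (hi : i < m) (hc : c < m - 1 - i) :
    ((PySem.List.enumerate (UP m m) 0).foldl (fun d kp => d.insert kp.2 kp.1)
        (PySem.Dict.empty : PySem.Dict (Int × Int) Int)).getD ((i : Int), (i : Int) + 1 + c) 0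
      = (Kf m i + c : Nat) := by
  have hnd : ((PySem.List.enumerate (UP m m) 0).map (fun kp => kp.2)).Nodup := by
    rw [PySem.List.map_snd_enumerate]; exact nodup_UP m
  have hitems := PySem.Dict.items_foldl_insert_fresh (PySem.List.enumerate (UP m m) 0)
      (fun kp => kp.2) (fun kp => kp.1) (PySem.Dict.empty : PySem.Dict (Int × Int) Int)
      (fun a _ => PySem.Dict.contains_empty _) hnd
  have hkeys : ((PySem.List.enumerate (UP m m) 0).foldl (fun d kp => d.insert kp.2 kp.1)
      (PySem.Dict.empty : PySem.Dict (Int × Int) Int)).keys.Nodup :=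
    PySem.Dict.nodup_keys_foldl_insert_key (PySem.List.enumerate (UP m m) 0)
      (fun kp => kp.2) (fun _ kp => kp.1) PySem.Dict.empty PySem.Dict.nodup_keys_empty
  refine PySem.Dict.getD_of_mem_items _ ?_ hkeys 0
  rw [hitems]
  simp only [PySem.Dict.empty, List.nil_append, List.mem_map]
  exact ⟨_, mem_enum_UP m i c hi hc, rfl⟩

-- ===== B side =====
-- the inner step of B's port, named for the proofs (defeq to the port's lambda)
def bstep (tb i : Int) (st : Int × Nat × Nat) (j : Int) : Int × Nat × Nat :=
  let bit : Int := if j = i + 1 then 1 else PySem.Int.band (tb >>> st.2.2) 1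
  let tidx : Nat := if j = i + 1 then st.2.2 else st.2.2 + 1
  let ubits : Int := if bit ≠ 0 then PySem.Int.bor st.1 ((1 : Int) <<< st.2.1) else st.1
  (ubits, st.2.1 + 1, tidx)

theorem bstep_spine (tb i : Int) (u : Int) (k t : Nat) :
    bstep tb i (u, k, t) (i + 1) = (PySem.Int.bor u ((1 : Int) <<< k), k + 1, t) := by
  simp [bstep]

theorem bstep_other (tb i j : Int) (hj : j ≠ i + 1) (u : Int) (k t : Nat) :
    bstep tb i (u, k, t) j
      = (if PySem.Int.band (tb >>> t) 1 ≠ 0 then PySem.Int.bor u ((1 : Int) <<< k) else u, k + 1, t + 1) := by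
  simp [bstep, if_neg hj]

theorem B_tail (tb : Int) (i : Int) (w : Nat) :
    ∀ (u k t : Nat),
    ((List.range w).map (fun (c : Nat) => i + 1 + 1 + (c : Int))).foldl (bstep tb i) ((u : Int), k, t)
      = (((u ||| rowOr tb k t w : Nat) : Int), k + w, t + w) := by
  induction w with
  | zero => intro u k t; simp [rowOr]
  | succ w ih =>
    intro u k t
    rw [List.range_succ, List.map_append, List.foldl_append, ih]
    have hne : (i + 1 + 1 + (w : Int)) ≠ i + 1 := by omega
    simp only [List.map_cons, List.map_nil, List.foldl_cons, List.foldl_nil]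
    rw [bstep_other tb i _ hne, rowOr_succ]
    by_cases hb : PySem.Int.band (tb >>> (t + w)) 1 ≠ 0
    · simp only [if_pos hb, cast_bor_shift, Prod.mk.injEq]
      exact ⟨by exact_mod_cast Nat.or_assoc u (rowOr tb k t w) (2 ^ (k + w)), by omega, by omega⟩
    · simp only [if_neg hb, Prod.mk.injEq]
      exact ⟨trivial, by omega, by omega⟩

theorem B_row (n tb : Int) (hn : 0 ≤ n) (i : Nat) (hi : i < n.toNat) (u : Nat) :
    (PySem.List.pyRange ((i : Int) + 1) n 1).foldl (bstep tb (i : Int)) ((u : Int), Kf n.toNat i, Tf n.toNat i)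
      = (((u ||| rowAll n.toNat tb i : Nat) : Int), Kf n.toNat (i + 1), Tf n.toNat (i + 1)) := by
  by_cases h : i + 1 < n.toNat
  · rw [PySem.List.pyRange_one_cons (by omega : (i : Int) + 1 < n), List.foldl_cons,
      bstep_spine, cast_bor_shift, PySem.List.pyRange_one]
    have hw : (n - ((i : Int) + 1 + 1)).toNat = n.toNat - 2 - i := by omega
    rw [hw, B_tail]
    rw [rowAll, if_pos h, Kf_succ, Tf_succ]
    simp only [Prod.mk.injEq]
    refine ⟨by exact_mod_cast Nat.or_assoc u (2 ^ Kf n.toNat i) _, by omega, trivial⟩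
  · rw [PySem.List.pyRange_one_eq_nil (by omega : n ≤ (i : Int) + 1),
      List.foldl_nil, rowAll, if_neg h, Kf_succ, Tf_succ]
    have h1 : n.toNat - 1 - i = 0 := by omega
    have h2 : n.toNat - 2 - i = 0 := by omega
    rw [h1, h2]
    simp

theorem DD_succ (m : Nat) (tb : Int) (p : Nat) : DD m tb (p + 1) = DD m tb p ||| rowAll m tb p := by
  simp [DD, List.range_succ]

theorem B_outer (n tb : Int) (hn : 0 ≤ n) : ∀ p, p ≤ n.toNat →
    ((List.range p).map (fun (k : Nat) => ((k : Int)))).foldl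
      (fun (st : Int × Nat × Nat) i => (PySem.List.pyRange (i + 1) n 1).foldl (bstep tb i) st)
      ((0 : Int), (0 : Nat), (0 : Nat))
      = (((DD n.toNat tb p : Nat) : Int), Kf n.toNat p, Tf n.toNat p) := by
  intro p
  induction p with
  | zero => simp [DD, Kf, Tf]
  | succ p ih =>
    intro hp
    rw [List.range_succ, List.map_append, List.foldl_append, ih (by omega)]
    simp only [List.map_cons, List.map_nil, List.foldl_cons, List.foldl_nil]
    rw [B_row n tb hn p (by omega), DD_succ]

theorem B_main (n tb : Int) (hn : 0 ≤ n) :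
    tiling_to_upper_alt n tb = ((DD n.toNat tb n.toNat : Nat) : Int) := by
  show ((PySem.List.pyRange 0 n 1).foldl
      (fun (st : Int × Nat × Nat) i => (PySem.List.pyRange (i + 1) n 1).foldl (bstep tb i) st)
      ((0 : Int), (0 : Nat), (0 : Nat))).1 = _
  rw [PySem.List.pyRange_one]
  simp only [zero_add, Int.sub_zero]
  rw [B_outer n tb hn n.toNat le_rfl]

-- ===== A side =====
def upDict (m : Nat) : PySem.Dict (Int × Int) Int :=
  (PySem.List.enumerate (UP m m) 0).foldl (fun d kp => d.insert kp.2 kp.1) PySem.Dict.empty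

theorem upDict_getD (m i c : Nat) (hi : i < m) (hc : c < m - 1 - i) :
    (upDict m).getD ((i : Int), (i : Int) + 1 + (c : Int)) 0 = ((Kf m i + c : Nat) : Int) :=
  upper_idx_getD m i c hi hc

-- the step of A's tiling loop, named for the proofs (defeq to the port's lambda)
def astep (tb : Int) (m : Nat) (u : Int) (tp : Int × (Int × Int)) : Int :=
  if PySem.Int.band (tb >>> tp.1.toNat) 1 ≠ 0 then
    PySem.Int.bor u ((1 : Int) <<< ((upDict m).getD tp.2 0).toNat)
  else u

theorem build_pairs (n : Int) (hn : 0 ≤ n) :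
    (PySem.List.pyRange 0 n 1).foldl (fun acc i =>
        (PySem.List.pyRange (i+1) n 1).foldl (fun acc j => acc ++ [(i, j)]) acc) ([] : List (Int × Int))
      = UP n.toNat n.toNat := by
  have h1 : ∀ (acc : List (Int × Int)) (i : Int),
      (PySem.List.pyRange (i+1) n 1).foldl (fun acc j => acc ++ [(i, j)]) acc
        = acc ++ (PySem.List.pyRange (i+1) n 1).map (fun j => (i, j)) :=
    fun acc i => PySem.List.foldl_append_singleton_eq_map _ _ _
  simp only [h1]
  rw [PySem.List.foldl_append_eq_flatMap, List.nil_append, PySem.List.pyRange_one]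
  simp only [zero_add, Int.sub_zero]
  rw [List.flatMap_map, UP]
  congr 1
  funext k
  rw [PySem.List.pyRange_one, List.map_map, uRow]
  have hw : (n - ((k : Int) + 1)).toNat = n.toNat - 1 - k := by omega
  rw [hw]
  rfl

theorem build_edges (n : Int) (hn : 0 ≤ n) :
    (PySem.List.pyRange 0 n 1).foldl (fun acc i =>
        (PySem.List.pyRange (i+2) n 1).foldl (fun acc j => acc ++ [(i, j)]) acc) ([] : List (Int × Int))
      = TE n.toNat n.toNat := by
  have h1 : ∀ (acc : List (Int × Int)) (i : Int),
      (PySem.List.pyRange (i+2) n 1).foldl (fun acc j => acc ++ [(i, j)]) acc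
        = acc ++ (PySem.List.pyRange (i+2) n 1).map (fun j => (i, j)) :=
    fun acc i => PySem.List.foldl_append_singleton_eq_map _ _ _
  simp only [h1]
  rw [PySem.List.foldl_append_eq_flatMap, List.nil_append, PySem.List.pyRange_one]
  simp only [zero_add, Int.sub_zero]
  rw [List.flatMap_map, TE]
  congr 1
  funext k
  rw [PySem.List.pyRange_one, List.map_map, tRow]
  have hw : (n - ((k : Int) + 2)).toNat = n.toNat - 2 - k := by omega
  rw [hw]
  rfl

theorem A_spine (n : Int) (hn : 0 ≤ n) : ∀ p, p ≤ n.toNat - 1 → ∀ (u : Nat),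
    ((List.range p).map (fun (k : Nat) => ((k : Int)))).foldl
      (fun u i => PySem.Int.bor u ((1 : Int) <<< (((upDict n.toNat).getD (i, i+1) 0).toNat))) (u : Int)
      = ((u ||| SSf n.toNat p : Nat) : Int) := by
  intro p
  induction p with
  | zero => intro _ u; simp [SSf]
  | succ p ih =>
    intro hp u
    rw [List.range_succ, List.map_append, List.foldl_append, ih (by omega)]
    simp only [List.map_cons, List.map_nil, List.foldl_cons, List.foldl_nil]
    have hkey : ((p : Int), (p : Int) + 1) = ((p : Int), (p : Int) + 1 + ((0 : Nat) : Int)) := by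
      norm_num
    rw [hkey, upDict_getD n.toNat p 0 (by omega) (by omega), Int.toNat_natCast, cast_bor_shift]
    have hS : SSf n.toNat (p + 1) = SSf n.toNat p ||| 2 ^ Kf n.toNat p := by
      simp [SSf, List.range_succ]
    rw [hS, Nat.add_zero, Nat.or_assoc]

theorem A_row_tail (n tb : Int) (hn : 0 ≤ n) (i : Nat) (hi : i < n.toNat) :
    ∀ w, w ≤ n.toNat - 2 - i → ∀ (u : Nat),
    (PySem.List.enumerate ((List.range w).map (fun (c : Nat) => ((i : Int), (i : Int) + 2 + (c : Int))))
        ((Tf n.toNat i : Nat) : Int)).foldl (astep tb n.toNat) (u : Int)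
      = ((u ||| rowOr tb (Kf n.toNat i + 1) (Tf n.toNat i) w : Nat) : Int) := by
  intro w
  induction w with
  | zero => intro _ u; simp [PySem.List.enumerate_nil, rowOr]
  | succ w ih =>
    intro hw u
    rw [List.range_succ, List.map_append, PySem.List.enumerate_append, List.foldl_append, ih (by omega)]
    simp only [List.map_cons, List.map_nil, PySem.List.enumerate_cons, PySem.List.enumerate_nil,
      List.foldl_cons, List.foldl_nil, List.length_map, List.length_range]
    rw [astep]
    have ht : (((Tf n.toNat i : Nat) : Int) + (w : Int)).toNat = Tf n.toNat i + w := by omega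
    have hkey : ((i : Int) + 2 + (w : Int)) = (i : Int) + 1 + (((w + 1 : Nat)) : Int) := by
      push_cast; ring
    simp only [ht, hkey]
    rw [upDict_getD n.toNat i (w + 1) hi (by omega), Int.toNat_natCast, cast_bor_shift, rowOr_succ]
    by_cases hb : PySem.Int.band (tb >>> (Tf n.toNat i + w)) 1 ≠ 0
    · rw [if_pos hb, if_pos hb]
      have he : Kf n.toNat i + (w + 1) = Kf n.toNat i + 1 + w := by omega
      rw [he, ← Nat.or_assoc]
    · rw [if_neg hb, if_neg hb]

theorem A_til (n tb : Int) (hn : 0 ≤ n) : ∀ p, p ≤ n.toNat → ∀ (u : Nat),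
    (PySem.List.enumerate (TE n.toNat p) 0).foldl (astep tb n.toNat) (u : Int)
      = ((u ||| TT n.toNat tb p : Nat) : Int) := by
  intro p
  induction p with
  | zero => intro _ u; simp [TE, TT, PySem.List.enumerate_nil]
  | succ p ih =>
    intro hp u
    have hTE : TE n.toNat (p + 1) = TE n.toNat p ++ tRow n.toNat p := by
      simp [TE, List.range_succ]
    rw [hTE, PySem.List.enumerate_append, List.foldl_append, ih (by omega), length_TE, zero_add]
    rw [tRow, A_row_tail n tb hn p (by omega) (n.toNat - 2 - p) le_rfl]
    have hT : TT n.toNat tb (p + 1)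
        = TT n.toNat tb p ||| rowOr tb (Kf n.toNat p + 1) (Tf n.toNat p) (n.toNat - 2 - p) := by
      simp [TT, List.range_succ]
    rw [hT, Nat.or_assoc]

theorem dict_counter (xs : List (Int × Int)) : ∀ (d : PySem.Dict (Int × Int) Int) (s : Int),
    (xs.foldl (fun (p : PySem.Dict (Int × Int) Int × Int) pr =>
        (p.1.insert pr p.2, p.2 + 1)) (d, s)).1
      = (PySem.List.enumerate xs s).foldl (fun d kp => d.insert kp.2 kp.1) d := by
  induction xs with
  | nil => intro d s; simp [PySem.List.enumerate_nil]
  | cons x xs ih =>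
    intro d s
    simp only [List.foldl_cons, PySem.List.enumerate_cons]
    exact ih (d.insert x s) (s + 1)

theorem til_counter (tb : Int) (m : Nat) (xs : List (Int × Int)) : ∀ (u : Int) (s : Int),
    (xs.foldl (fun (p : Int × Int) (pr : Int × Int) =>
        (if PySem.Int.band (tb >>> p.2.toNat) 1 ≠ 0 then
          PySem.Int.bor p.1 ((1 : Int) <<< ((upDict m).getD pr 0).toNat)
        else p.1, p.2 + 1)) (u, s)).1
      = (PySem.List.enumerate xs s).foldl (astep tb m) u := by
  induction xs with
  | nil => intro u s; simp [PySem.List.enumerate_nil]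
  | cons x xs ih =>
    intro u s
    simp only [List.foldl_cons, PySem.List.enumerate_cons]
    rw [ih]
    rfl

theorem A_main (n tb : Int) (hn : 0 ≤ n) :
    tiling_to_upper n tb = ((SSf n.toNat (n.toNat - 1) ||| TT n.toNat tb n.toNat : Nat) : Int) := by
  simp only [tiling_to_upper]
  rw [build_pairs n hn, build_edges n hn, dict_counter]
  show ((TE n.toNat n.toNat).foldl (fun (p : Int × Int) (pr : Int × Int) =>
      (if PySem.Int.band (tb >>> p.2.toNat) 1 ≠ 0 then
        PySem.Int.bor p.1 ((1 : Int) <<< ((upDict n.toNat).getD pr 0).toNat)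
      else p.1, p.2 + 1))
      ((PySem.List.pyRange 0 (n-1) 1).foldl (fun u i =>
        PySem.Int.bor u ((1 : Int) <<< (((upDict n.toNat).getD (i, i+1) 0).toNat))) 0, 0)).1 = _
  rw [til_counter tb n.toNat (TE n.toNat n.toNat)]
  rw [PySem.List.pyRange_one]
  simp only [zero_add, Int.sub_zero]
  have hlen : (n - 1).toNat = n.toNat - 1 := by omega
  rw [hlen]
  have hsp := A_spine n hn (n.toNat - 1) le_rfl 0
  simp only [Nat.zero_or] at hsp
  rw [Nat.cast_zero] at hsp
  rw [hsp, A_til n tb hn n.toNat le_rfl]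

theorem merge (m : Nat) (tb : Int) : SSf m (m - 1) ||| TT m tb m = DD m tb m := by
  have h1 : DD m tb m = (List.range m).foldl
      (fun u i => u ||| ((if i + 1 < m then 2 ^ Kf m i else 0) ||| rowOr tb (Kf m i + 1) (Tf m i) (m - 2 - i))) 0 := by
    rw [DD]
    refine PySem.List.foldl_congr_mem _ _ _ _ ?_
    intro acc i hi
    rw [List.mem_range] at hi
    rw [rowAll]
    by_cases h : i + 1 < m
    · rw [if_pos h, if_pos h]
    · rw [if_neg h, if_neg h]
      have hz : m - 2 - i = 0 := by omega
      rw [hz]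
      simp [rowOr]
  rw [h1, or_fold_merge (List.range m)
      (fun i => if i + 1 < m then 2 ^ Kf m i else 0)
      (fun i => rowOr tb (Kf m i + 1) (Tf m i) (m - 2 - i))]
  have h2 : (List.range m).foldl (fun u i => u ||| (if i + 1 < m then 2 ^ Kf m i else 0)) 0
      = SSf m (m - 1) := by
    cases m with
    | zero => simp [SSf]
    | succ q =>
      rw [List.range_succ, List.foldl_append, List.foldl_cons, List.foldl_nil]
      rw [if_neg (by omega : ¬ q + 1 < q + 1), Nat.or_zero]
      have : (List.range q).foldl (fun u i => u ||| (if i + 1 < q + 1 then 2 ^ Kf (q+1) i else 0)) 0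
          = (List.range q).foldl (fun u i => u ||| 2 ^ Kf (q+1) i) 0 := by
        refine PySem.List.foldl_congr_mem _ _ _ _ ?_
        intro acc i hi
        rw [List.mem_range] at hi
        rw [if_pos (by omega)]
      rw [this]
      rfl
  rw [h2]
  rfl

-- ===== VERDICT (by name: the statement is the Claim_ definition above) =====
theorem tiling_to_upper_spec : Claim_equal_tiling_to_upper := by
  intro n tb _
  unfold Spec_tiling_to_upper
  by_cases hn : 0 ≤ n
  · rw [A_main n tb hn, B_main n tb hn, merge]
  · have h1 : PySem.List.pyRange 0 n 1 = [] := PySem.List.pyRange_one_eq_nil (by omega)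
    have h2 : PySem.List.pyRange 0 (n - 1) 1 = [] := PySem.List.pyRange_one_eq_nil (by omega)
    simp [tiling_to_upper, tiling_to_upper_alt, h1, h2, PySem.List.enumerate_nil]
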